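-- pv_equiv track=rewrite | github.com/GrearNose/Exercise | jobHunting/VIPKIDS_2018_09_27/min_adjust_time.py | min_adjust_time
-- ===== SOURCE A (Python) =====
-- def min_adjust_time(s):
-- 	"""
-- 	Given a str consisting of 'b' and 'g', a char can only swap with the
-- 	two adjacent chars, figure out the min swap time to sort out the string
-- 	such that 'b's cluster in one end of the string and 'g's the other end.
-- 	"""
-- 	s = s.lower()
-- 	assert all([c in 'bg' for c in s])
-- 	swap_b,swap_g,ln_b,ln_g,ix = 0,0,0,0,0
-- 	for c in s:
-- 		if 'b' == c:
-- 			swap_b += ix-ln_b # swapping time of the current char 'b'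
-- 			ln_b += 1 # length of the substr of 'b'
-- 		else:
-- 			swap_g += ix-ln_g
-- 			ln_g += 1
-- 		ix += 1
-- 	return min(swap_b,swap_g)
-- ===== SOURCE B (Python) =====
-- def min_adjust_time(s):
--     """
--     Closed-form re-implementation: collect the indices of 'b' and of 'g',
--     then min swaps = sum(positions) - arithmetic series 0+1+...+(n-1).
--     """
--     s = s.lower()
--     assert all([c in 'bg' for c in s])
--     b = [i for i, c in enumerate(s) if c == 'b']
--     g = [i for i, c in enumerate(s) if c == 'g']
--     swap_b = sum(b) - len(b) * (len(b) - 1) // 2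
--     swap_g = sum(g) - len(g) * (len(g) - 1) // 2
--     return min(swap_b, swap_g)
-- ===== Notes on version B (the rewrite author's own statement) =====
-- stated objective: alternative
-- what changed: Replaces the incremental per-character accumulation of four running counters with a collect-then-closed-form computation: gather the index lists of 'b' and 'g' via enumerate and compute each swap count as sum(positions) minus the triangular number n(n-1)/2.
import Mathlib
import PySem

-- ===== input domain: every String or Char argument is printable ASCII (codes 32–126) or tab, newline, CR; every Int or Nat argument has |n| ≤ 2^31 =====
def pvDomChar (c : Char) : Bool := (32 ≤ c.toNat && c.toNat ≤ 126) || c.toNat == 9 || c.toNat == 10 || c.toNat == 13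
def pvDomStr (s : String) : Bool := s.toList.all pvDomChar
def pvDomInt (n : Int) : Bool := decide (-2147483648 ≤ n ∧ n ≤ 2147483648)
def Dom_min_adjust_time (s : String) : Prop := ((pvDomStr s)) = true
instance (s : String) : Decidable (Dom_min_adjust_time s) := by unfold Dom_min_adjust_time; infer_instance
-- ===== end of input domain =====

-- B replaces A's incremental four-counter scan by collecting the index lists of 'b'/'g'
-- and a closed-form triangular-number formula (objective: alternative decomposition).


-- ===== PORT A =====
-- the for-loop over s with state (swap_b, swap_g, ln_b, ln_g, ix)
def minAdjLoop : List Char → Int → Int → Int → Int → Int → Int × Int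
  | [], sb, sg, _, _, _ => (sb, sg)
  | c :: t, sb, sg, lb, lg, ix =>
    if c = 'b' then minAdjLoop t (sb + (ix - lb)) sg (lb + 1) lg (ix + 1)
    else minAdjLoop t sb (sg + (ix - lg)) lb (lg + 1) (ix + 1)

def min_adjust_time (s : String) : Int :=
  let l := (PySem.Str.lower s).toList
  let r := minAdjLoop l 0 0 0 0 0
  min r.1 r.2

-- ===== PORT B =====
def min_adjust_time_alt (s : String) : Int :=
  let l := (PySem.Str.lower s).toList
  let b := ((PySem.List.enumerate l 0).filter (fun p => p.2 == 'b')).map (·.1)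
  let g := ((PySem.List.enumerate l 0).filter (fun p => p.2 == 'g')).map (·.1)
  let swap_b := b.sum - PySem.Int.floordiv ((b.length : Int) * ((b.length : Int) - 1)) 2
  let swap_g := g.sum - PySem.Int.floordiv ((g.length : Int) * ((g.length : Int) - 1)) 2
  min swap_b swap_g

-- ===== PRECONDITION & SPEC =====
-- Pre_ excludes exactly the strings on which A's assert fails (AssertionError): a char
-- of s.lower() other than 'b'/'g'. B raises there too.
def Pre_min_adjust_time (s : String) : Prop :=
  ((PySem.Str.lower s).toList.all (fun c => c == 'b' || c == 'g')) = true
instance (s : String) : Decidable (Pre_min_adjust_time s) := by unfold Pre_min_adjust_time; infer_instance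
def pvWitness_min_adjust_time : String := "gBbg"

def Spec_min_adjust_time (s : String) (out : Int) : Prop := out = min_adjust_time_alt s
instance (s : String) (out : Int) : Decidable (Spec_min_adjust_time s out) := by unfold Spec_min_adjust_time; infer_instance

-- ===== CLAIM (what is proved, stated in full; the proofs are below) =====
def Claim_equal_min_adjust_time : Prop := ∀ (s : String), Dom_min_adjust_time s → Pre_min_adjust_time s → Spec_min_adjust_time s (min_adjust_time s)

-- ===== LEMMAS AND PROOFS =====

-- triangular number 0+1+...+(n-1), as an Int
def triInt (n : Nat) : Int := ((n * (n - 1) / 2 : Nat) : Int)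

theorem triInt_succ (n : Nat) : triInt (n + 1) = triInt n + n := by
  unfold triInt
  simp only [Nat.add_sub_cancel]
  have : (n + 1) * n / 2 = n * (n - 1) / 2 + n := by
    rcases n with _ | m
    · rfl
    · have h : (m + 2) * (m + 1) = (m + 1) * m + (m + 1) * 2 := by ring
      simp [h, Nat.add_mul_div_right]
  rw [this]; push_cast; ring

-- index sum and count of occurrences of a char, enumerated from ix
def posSum (ch : Char) (l : List Char) (ix : Int) : Int :=
  (((PySem.List.enumerate l ix).filter (fun p => p.2 == ch)).map (·.1)).sum
def cnt (ch : Char) (l : List Char) : Nat :=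
  ((PySem.List.enumerate l 0).filter (fun p => p.2 == ch)).length

def cnt' (ch : Char) (l : List Char) : Nat := l.countP (fun c => c == ch)

theorem cnt_eq (ch : Char) (l : List Char) (ix : Int) :
    ((PySem.List.enumerate l ix).filter (fun p => p.2 == ch)).length = cnt' ch l := by
  induction l generalizing ix with
  | nil => rfl
  | cons c t ih =>
    simp only [PySem.List.enumerate_cons, List.filter, cnt', List.countP_cons]
    by_cases h : (c == ch) = true <;> simp [h, ih, cnt']

theorem posSum_cons (ch c : Char) (t : List Char) (ix : Int) :
    posSum ch (c :: t) ix =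
      (if c = ch then ix else 0) + posSum ch t (ix + 1) := by
  simp only [posSum, PySem.List.enumerate_cons, List.filter_cons]
  by_cases h : c = ch <;> simp [h]

-- the loop invariant: the fold equals the closed form
theorem minAdjLoop_eq (l : List Char) (sb sg lb lg ix : Int)
    (h : l.all (fun c => c == 'b' || c == 'g') = true) :
    minAdjLoop l sb sg lb lg ix =
      (sb + posSum 'b' l ix - (cnt' 'b' l : Int) * lb - triInt (cnt' 'b' l),
       sg + posSum 'g' l ix - (cnt' 'g' l : Int) * lg - triInt (cnt' 'g' l)) := by
  induction l generalizing sb sg lb lg ix with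
  | nil => simp [minAdjLoop, posSum, cnt', triInt]
  | cons c t ih =>
    simp only [List.all_cons, Bool.and_eq_true] at h
    by_cases hc : c = 'b'
    · subst hc
      rw [minAdjLoop, if_pos rfl, ih _ _ _ _ _ h.2]
      rw [posSum_cons, posSum_cons]
      simp only [cnt', List.countP_cons]
      norm_num [triInt_succ]
      constructor <;> push_cast <;> ring_nf
    · have hg : c = 'g' := by
        rcases h.1 with h1
        simp [hc] at h1; exact h1
      subst hg
      rw [minAdjLoop, if_neg (by decide), ih _ _ _ _ _ h.2]
      rw [posSum_cons, posSum_cons]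
      simp only [cnt', List.countP_cons]
      norm_num [triInt_succ]
      constructor <;> push_cast <;> ring_nf

theorem floordiv_tri (n : Nat) :
    PySem.Int.floordiv ((n : Int) * ((n : Int) - 1)) 2 = triInt n := by
  have : (n : Int) * ((n : Int) - 1) = ((n * (n - 1) : Nat) : Int) := by
    rcases n with _ | m
    · simp
    · push_cast [Nat.succ_sub_one]; ring
  rw [this]
  exact_mod_cast PySem.Int.floordiv_natCast (n * (n - 1)) 2

-- ===== VERDICT (by name: the statement is the Claim_ definition above) =====
theorem min_adjust_time_spec : Claim_equal_min_adjust_time := by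
  intro s _ hpre
  unfold Spec_min_adjust_time min_adjust_time min_adjust_time_alt
  dsimp only
  rw [minAdjLoop_eq _ _ _ _ _ _ hpre]
  have hb := cnt_eq 'b' (PySem.Str.lower s).toList 0
  have hg := cnt_eq 'g' (PySem.Str.lower s).toList 0
  simp only [List.length_map, hb, hg, floordiv_tri, posSum]
  norm_num
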